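-- pv_equiv track=rewrite | github.com/r-1317/AtCoder | 2025/ABC422/d.py | calc_imbalance
-- ===== SOURCE A (Python) =====
-- def calc_imbalance(ans_list, x):
--   x = max(x, max(ans_list) - min(ans_list))
--
--   if len(ans_list) == 1:
--     return x
--
--   new_ans_list = []
--   for i in range(0, len(ans_list), 2):
--     new_ans_list.append(ans_list[i] + ans_list[i+1])
--   return calc_imbalance(new_ans_list, x)
-- ===== SOURCE B (Python) =====
-- def calc_imbalance(ans_list, x):
--     # Iterative: one prefix-sum pass, then each level read off as strided
--     # differences of the prefix array (no repeated pairwise list rebuilding).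
--     n = len(ans_list)
--     P = [0]
--     s = 0
--     for v in ans_list:
--         s += v
--         P.append(s)
--     best = x
--     step = 1
--     while True:
--         level = [P[(j + 1) * step] - P[j * step] for j in range(n // step)]
--         d = max(level) - min(level)
--         if d > best:
--             best = d
--         if step >= n:
--             return best
--         step *= 2
-- ===== Notes on version B (the rewrite author's own statement) =====
-- stated objective: alternative
-- what changed: Replaces the recursion that rebuilds a halved list of pairwise sums at every level by an iterative loop over one precomputed prefix-sum array, reading each level's block sums as strided differences P[(j+1)*step]-P[j*step]; the recursion and all intermediate pairwise lists disappear.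
import Mathlib
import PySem

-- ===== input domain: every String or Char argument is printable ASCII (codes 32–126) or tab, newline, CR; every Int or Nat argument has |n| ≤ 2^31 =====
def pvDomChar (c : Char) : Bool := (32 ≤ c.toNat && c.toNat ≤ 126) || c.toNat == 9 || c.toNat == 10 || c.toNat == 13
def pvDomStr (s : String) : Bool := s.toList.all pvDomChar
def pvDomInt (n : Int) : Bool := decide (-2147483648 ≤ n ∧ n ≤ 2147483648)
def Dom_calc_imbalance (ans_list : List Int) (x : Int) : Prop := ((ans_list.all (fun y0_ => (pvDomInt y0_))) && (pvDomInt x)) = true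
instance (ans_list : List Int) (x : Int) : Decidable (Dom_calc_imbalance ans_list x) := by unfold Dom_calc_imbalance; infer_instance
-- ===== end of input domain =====

-- B replaces the level-by-level recursion over rebuilt pairwise-sum lists by one
-- prefix-sum array read with strides (alternative algorithm, same asymptotic cost).

-- ===== PORT A =====
-- fuel = recursion depth bound; the Python recursion halves the list, so
-- ans_list.length + 1 levels always suffice on the admitted inputs.
def pvCalcA (fuel : Nat) (ans_list : List Int) (x : Int) : Int :=
  match fuel with
  | 0 => x
  | fuel + 1 =>
    let x' := max x (((PySem.List.max? ans_list (fun y => y)).getD 0) -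
                     ((PySem.List.min? ans_list (fun y => y)).getD 0))
    if ans_list.length = 1 then x'
    else
      let new_ans_list := (PySem.List.pyRange 0 (ans_list.length : Int) 2).foldl
        (fun acc i => acc ++ [PySem.List.pyGetD ans_list i 0 + PySem.List.pyGetD ans_list (i + 1) 0]) []
      pvCalcA fuel new_ans_list x'

def calc_imbalance (ans_list : List Int) (x : Int) : Int :=
  pvCalcA (ans_list.length + 1) ans_list x

-- ===== PORT B =====
-- fuel for the `while True` loop: step doubles from 1, so n + 1 iterations suffice.
def pvAltLoop (fuel : Nat) (P : List Int) (n : Nat) (step : Nat) (best : Int) : Int :=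
  match fuel with
  | 0 => best
  | fuel + 1 =>
    let level := (List.range (n / step)).map
      (fun j => P.getD ((j + 1) * step) 0 - P.getD (j * step) 0)
    let d := ((PySem.List.max? level (fun y => y)).getD 0) -
             ((PySem.List.min? level (fun y => y)).getD 0)
    let best' := if d > best then d else best
    if n ≤ step then best' else pvAltLoop fuel P n (step * 2) best'

def calc_imbalance_alt (ans_list : List Int) (x : Int) : Int :=
  let n := ans_list.length
  let P := (ans_list.foldl (fun (acc : List Int × Int) v => (acc.1 ++ [acc.2 + v], acc.2 + v)) ([0], 0)).1
  pvAltLoop (n + 1) P n 1 x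

-- ===== PRECONDITION & SPEC =====
-- Pre_: A returns exactly when the list length is a power of two; on every other
-- length A raises (ValueError for [], IndexError once a level of odd length > 1 is
-- reached), and B raises there too.
def Pre_calc_imbalance (ans_list : List Int) (x : Int) : Prop :=
  ∃ k, k ≤ ans_list.length ∧ ans_list.length = 2 ^ k

instance (ans_list : List Int) (x : Int) : Decidable (Pre_calc_imbalance ans_list x) := by
  unfold Pre_calc_imbalance; infer_instance

def pvWitness_calc_imbalance : List Int × Int := ([3, -1, 4, 1], 2)

def Spec_calc_imbalance (ans_list : List Int) (x : Int) (out : Int) : Prop := out = calc_imbalance_alt ans_list x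
instance (ans_list : List Int) (x : Int) (out : Int) : Decidable (Spec_calc_imbalance ans_list x out) := by unfold Spec_calc_imbalance; infer_instance

-- ===== CLAIM (what is proved, stated in full; the proofs are below) =====
def Claim_equal_calc_imbalance : Prop := ∀ (ans_list : List Int) (x : Int), Dom_calc_imbalance ans_list x → Pre_calc_imbalance ans_list x → Spec_calc_imbalance ans_list x (calc_imbalance ans_list x)

-- ===== LEMMAS AND PROOFS =====

-- the level list read from the prefix array P with `c` blocks of stride `s`
def pvLvl (P : List Int) (c s : Nat) : List Int :=
  (List.range c).map (fun j => P.getD ((j + 1) * s) 0 - P.getD (j * s) 0)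

theorem pvScanHead (t : List Int) (b : Int) :
    List.scanl (· + ·) b t = b :: (List.scanl (· + ·) b t).tail := by
  cases t <;> simp [List.scanl_cons, List.scanl_nil]

theorem pvFoldP (l : List Int) (P0 : List Int) (s0 : Int) :
    (l.foldl (fun (acc : List Int × Int) v => (acc.1 ++ [acc.2 + v], acc.2 + v)) (P0, s0)).1
      = P0 ++ (l.scanl (· + ·) s0).tail := by
  induction l generalizing P0 s0 with
  | nil => simp
  | cons v t ih =>
    rw [List.scanl_cons, List.foldl_cons, ih, List.tail_cons, pvScanHead t (s0 + v),
      List.tail_cons]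
    simp

theorem pvScanGetD (l : List Int) (c : Int) (i : Nat) (h : i ≤ l.length) :
    (l.scanl (· + ·) c).getD i 0 = c + (l.take i).sum := by
  induction l generalizing c i with
  | nil =>
    have : i = 0 := by simpa using h
    simp [this]
  | cons v t ih =>
    cases i with
    | zero => simp
    | succ i =>
      rw [List.scanl_cons, List.getD_cons_succ, List.take_succ_cons, List.sum_cons,
        ih (c + v) i (by simpa using h)]
      ring

theorem pvLvlOne (l : List Int) :
    pvLvl (l.scanl (· + ·) 0) l.length 1 = l := by
  apply List.ext_getElem
  · simp [pvLvl]
  · intro j h1 h2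
    simp only [pvLvl, List.getElem_map, List.getElem_range, mul_one]
    have hj : j < l.length := by simpa [pvLvl] using h1
    rw [pvScanGetD l 0 (j + 1) (by omega), pvScanGetD l 0 j (by omega),
      List.sum_take_succ l j hj]
    ring

theorem pvRange2 (c : Nat) :
    PySem.List.pyRange 0 ((2 * c : Nat) : Int) 2
      = (List.range c).map (fun k => ((2 * k : Nat) : Int)) := by
  rw [PySem.List.pyRange_of_pos 0 _ (by norm_num)]
  have hcount : (if (0 : Int) < ((2 * c : Nat) : Int)
      then ((((2 * c : Nat) : Int) - 0 + 2 - 1) / 2).toNat else 0) = c := by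
    rcases Nat.eq_zero_or_pos c with h | h
    · simp [h]
    · rw [if_pos (by push_cast; omega)]; omega
  rw [hcount]
  refine List.map_congr_left (fun k _ => ?_)
  push_cast; ring

theorem pvPairs (P : List Int) (c s : Nat) :
    (PySem.List.pyRange 0 ((pvLvl P (2 * c) s).length : Int) 2).foldl
      (fun acc i => acc ++ [PySem.List.pyGetD (pvLvl P (2 * c) s) i 0 +
                            PySem.List.pyGetD (pvLvl P (2 * c) s) (i + 1) 0]) []
      = pvLvl P c (2 * s) := by
  rw [PySem.List.foldl_append_singleton_eq_map, List.nil_append]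
  have hlen : ((pvLvl P (2 * c) s).length : Int) = ((2 * c : Nat) : Int) := by
    simp [pvLvl]
  rw [hlen, pvRange2, List.map_map]
  apply List.ext_getElem
  · simp [pvLvl]
  · intro k hk1 hk2
    have hk : k < c := by simpa [pvLvl] using hk2
    simp only [List.getElem_map, List.getElem_range, Function.comp_apply, pvLvl]
    have e1 : ((2 * k : Nat) : Int) + 1 = ((2 * k + 1 : Nat) : Int) := by push_cast; ring
    rw [e1, PySem.List.pyGetD_natCast, PySem.List.pyGetD_natCast,
      PySem.List.getD_map_range _ _ _ _ (by omega),
      PySem.List.getD_map_range _ _ _ _ (by omega)]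
    have e2 : (2 * k + 1) * s = 2 * k * s + s := by ring
    have e3 : (2 * k + 1 + 1) * s = (k + 1) * (2 * s) := by ring
    have e4 : 2 * k * s = k * (2 * s) := by ring
    rw [e3, e4, e2, e4]
    ring

theorem pvMaxEq (x d : Int) : max x d = if d > x then d else x := by
  rw [Int.max_def]; split_ifs <;> omega

theorem pvMain (t : Nat) (P : List Int) (s : Nat) (x : Int) (f1 f2 : Nat)
    (hs : 1 ≤ s) (h1 : t + 1 ≤ f1) (h2 : t + 1 ≤ f2) :
    pvCalcA f1 (pvLvl P (2 ^ t) s) x = pvAltLoop f2 P (s * 2 ^ t) s x := by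
  induction t generalizing s x f1 f2 with
  | zero =>
    obtain ⟨f1', rfl⟩ : ∃ f, f1 = f + 1 := ⟨f1 - 1, by omega⟩
    obtain ⟨f2', rfl⟩ : ∃ f, f2 = f + 1 := ⟨f2 - 1, by omega⟩
    simp only [pvCalcA, pvAltLoop, pow_zero, mul_one, Nat.div_self hs]
    have hl : pvLvl P 1 s = [P.getD s 0 - P.getD 0 0] := by
      simp [pvLvl]
    rw [hl]
    simp only [List.range_one, List.map_cons, List.map_nil, Nat.zero_mul,
      List.length_cons, List.length_nil, le_refl, if_true,
      PySem.List.max?_id_cons, PySem.List.min?_id_cons, List.foldl_nil, Option.getD_some]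
    rw [pvMaxEq]
    norm_num
  | succ t ih =>
    obtain ⟨f1', rfl⟩ : ∃ f, f1 = f + 1 := ⟨f1 - 1, by omega⟩
    obtain ⟨f2', rfl⟩ : ∃ f, f2 = f + 1 := ⟨f2 - 1, by omega⟩
    have hpow : (1:Nat) ≤ 2 ^ t := Nat.one_le_two_pow
    have hlen : (pvLvl P (2 ^ (t + 1)) s).length = 2 ^ (t + 1) := by simp [pvLvl]
    have hne : ¬ ((pvLvl P (2 ^ (t + 1)) s).length = 1) := by
      rw [hlen]; have : 2 ^ (t + 1) = 2 * 2 ^ t := by ring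
      omega
    have hdiv : s * 2 ^ (t + 1) / s = 2 ^ (t + 1) := Nat.mul_div_cancel_left _ (by omega)
    have hnle : ¬ (s * 2 ^ (t + 1) ≤ s) := by
      have : 2 ^ (t + 1) = 2 * 2 ^ t := by ring
      nlinarith
    simp only [pvCalcA, pvAltLoop, hdiv, if_neg hne, if_neg hnle]
    have h2c : (2 : Nat) ^ (t + 1) = 2 * 2 ^ t := by ring
    rw [h2c, pvPairs P (2 ^ t) s, pvMaxEq]
    have hn : s * (2 * 2 ^ t) = 2 * s * 2 ^ t := by ring
    have hs2 : s * 2 = 2 * s := by ring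
    rw [hn, hs2]
    exact ih (2 * s) _ f1' f2' (by omega) (by omega) (by omega)

-- ===== VERDICT (by name: the statement is the Claim_ definition above) =====
theorem calc_imbalance_spec : Claim_equal_calc_imbalance := by
  intro l x _ hpre
  obtain ⟨m, hm, hlen⟩ := hpre
  unfold Spec_calc_imbalance calc_imbalance calc_imbalance_alt
  simp only []
  rw [pvFoldP, List.singleton_append, ← pvScanHead]
  conv_lhs => rw [← pvLvlOne l]
  rw [hlen]
  have hL : (pvLvl (l.scanl (· + ·) 0) (2 ^ m) 1).length = 2 ^ m := by simp [pvLvl]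
  rw [hL]
  have := pvMain m (l.scanl (· + ·) 0) 1 x (2 ^ m + 1) (2 ^ m + 1) le_rfl
    (by have := Nat.lt_two_pow_self (n := m); omega)
    (by have := Nat.lt_two_pow_self (n := m); omega)
  simpa using this
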